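-- pv_equiv track=rewrite | github.com/alekhyaduba/ProblemSolving | HackerRank/COdeChef_!.py | weirdwalk
-- ===== SOURCE A (Python) =====
-- def weirdwalk(alice,bob):
--     alice=[0]+alice
--     bob=[0]+bob
--     sum=0
--     a_d=0
--     b_d=0
--     for i in range(len(alice)-1):
--         a_d+=alice[i+1]
--         b_d+=bob[i+1]
--         a=alice[i+1]
--         b=bob[i+1]
--
--         if a==b and a_d==b_d:
--             sum+=a
--
--
--     return sum
-- ===== SOURCE B (Python) =====
-- def weirdwalk(alice, bob):
--     # Backward pass: element i contributes iff alice[i] == bob[i] and the suffix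
--     # difference after i equals the total difference (equivalent to equal prefix sums).
--     m = len(alice)
--     t = sum(alice) - sum(bob[:m])
--     s = 0
--     total = 0
--     for i in range(m - 1, -1, -1):
--         x = alice[i]
--         y = bob[i]
--         if x == y and s == t:
--             total += x
--         s += x - y
--     return total
-- ===== Notes on version B (the rewrite author's own statement) =====
-- stated objective: alternative
-- what changed: A walks forward keeping two running prefix sums and compares them at each index; B walks the lists backward keeping a single suffix-difference accumulator and adds alice[i] when the elements match and that suffix difference equals the precomputed total difference (prefix sums equal iff suffix difference equals total difference).
import Mathlib
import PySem

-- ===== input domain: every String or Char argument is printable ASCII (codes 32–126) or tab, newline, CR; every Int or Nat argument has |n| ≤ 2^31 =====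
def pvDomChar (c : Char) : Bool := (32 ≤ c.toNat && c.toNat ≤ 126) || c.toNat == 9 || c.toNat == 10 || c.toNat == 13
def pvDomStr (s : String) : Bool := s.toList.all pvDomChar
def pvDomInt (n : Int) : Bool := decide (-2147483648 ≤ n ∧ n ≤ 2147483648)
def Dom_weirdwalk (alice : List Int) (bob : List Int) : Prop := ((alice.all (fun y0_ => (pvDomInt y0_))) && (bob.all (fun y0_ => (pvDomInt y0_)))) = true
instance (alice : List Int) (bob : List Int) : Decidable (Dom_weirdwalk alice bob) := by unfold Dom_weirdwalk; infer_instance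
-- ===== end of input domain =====

-- B walks BACKWARD with a single suffix-difference accumulator (checked against the total
-- difference) instead of A's forward pass with two running prefix sums (alternative, same cost).

-- ===== PORT A =====
def weirdwalk (alice : List Int) (bob : List Int) : Int :=
  let alice' := (0 : Int) :: alice
  let bob' := (0 : Int) :: bob
  let res := (PySem.List.pyRange 0 ((alice'.length : Int) - 1) 1).foldl
    (fun (st : Int × Int × Int) i =>
      let a_d := st.2.1 + PySem.List.pyGetD alice' (i + 1) 0
      let b_d := st.2.2 + PySem.List.pyGetD bob' (i + 1) 0
      let a := PySem.List.pyGetD alice' (i + 1) 0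
      let b := PySem.List.pyGetD bob' (i + 1) 0
      (if a = b ∧ a_d = b_d then st.1 + a else st.1, a_d, b_d))
    ((0 : Int), (0 : Int), (0 : Int))
  res.1

-- ===== PORT B =====
def weirdwalk_alt (alice : List Int) (bob : List Int) : Int :=
  let m := (alice.length : Int)
  let t := alice.sum - (PySem.List.slice bob (some 0) (some m)).sum
  let res := (PySem.List.pyRange (m - 1) (-1) (-1)).foldl
    (fun (st : Int × Int) i =>
      let x := PySem.List.pyGetD alice i 0
      let y := PySem.List.pyGetD bob i 0
      ((if x = y ∧ st.2 = t then st.1 + x else st.1), st.2 + (x - y)))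
    ((0 : Int), (0 : Int))
  res.1

-- ===== PRECONDITION & SPEC =====
-- When bob is shorter than alice, the Python A raises IndexError (bob[i+1]); those inputs are excluded.
def Pre_weirdwalk (alice : List Int) (bob : List Int) : Prop := alice.length ≤ bob.length
instance (alice : List Int) (bob : List Int) : Decidable (Pre_weirdwalk alice bob) := by unfold Pre_weirdwalk; infer_instance
def pvWitness_weirdwalk : List Int × List Int := ([1, 2, -1], [1, 3, -2])

def Spec_weirdwalk (alice : List Int) (bob : List Int) (out : Int) : Prop := out = weirdwalk_alt alice bob
instance (alice : List Int) (bob : List Int) (out : Int) : Decidable (Spec_weirdwalk alice bob out) := by unfold Spec_weirdwalk; infer_instance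

-- ===== CLAIM (what is proved, stated in full; the proofs are below) =====
def Claim_equal_weirdwalk : Prop := ∀ (alice : List Int) (bob : List Int), Dom_weirdwalk alice bob → Pre_weirdwalk alice bob → Spec_weirdwalk alice bob (weirdwalk alice bob)

-- ===== LEMMAS AND PROOFS =====

-- the common mathematical value, in A's (forward) shape
def goldWW : List Int → List Int → Int → Int → Int
  | [], _, _, _ => 0
  | _ :: _, [], _, _ => 0
  | a :: as, b :: bs, ad, bd =>
      (if a = b ∧ ad + a = bd + b then a else 0) + goldWW as bs (ad + a) (bd + b)

-- sum of elementwise differences over the zipped part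
def dsumWW : List Int → List Int → Int
  | x :: xs, y :: ys => (x - y) + dsumWW xs ys
  | _, _ => 0

-- B's backward recursion: (running total, suffix difference) given the global total difference t
def gBWW (t : Int) : List Int → List Int → Int × Int
  | x :: xs, y :: ys =>
      let p := gBWW t xs ys
      ((if x = y ∧ p.2 = t then p.1 + x else p.1), (x - y) + p.2)
  | _, _ => ((0 : Int), (0 : Int))

lemma getD_of_drop (xs : List Int) (k : Nat) (a : Int) (rest : List Int)
    (h : xs.drop k = a :: rest) : xs.getD k 0 = a := by
  have h1 : (xs.drop k)[0]? = xs[k + 0]? := List.getElem?_drop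
  rw [h] at h1
  have h0 : xs[k]? = some a := by simpa using h1.symm
  simp [List.getD, h0]

lemma drop_succ_of_drop (l : List Int) (k : Nat) (y : Int) (ys : List Int)
    (h : l.drop k = y :: ys) : l.drop (k + 1) = ys := by
  have h2 : (l.drop k).tail = l.drop (k + 1) := List.tail_drop
  rw [h] at h2
  simpa using h2.symm

lemma loopA (xa xb : List Int) : ∀ (as bs : List Int) (k : Nat) (s ad bd : Int),
    xa.drop (k + 1) = as → xb.drop (k + 1) = bs → as.length ≤ bs.length →
    ((PySem.List.pyRange (k : Int) ((k : Int) + as.length) 1).foldl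
      (fun (st : Int × Int × Int) i =>
        let a_d := st.2.1 + PySem.List.pyGetD xa (i + 1) 0
        let b_d := st.2.2 + PySem.List.pyGetD xb (i + 1) 0
        let a := PySem.List.pyGetD xa (i + 1) 0
        let b := PySem.List.pyGetD xb (i + 1) 0
        (if a = b ∧ a_d = b_d then st.1 + a else st.1, a_d, b_d))
      (s, ad, bd)).1
    = s + goldWW as bs ad bd := by
  intro as
  induction as with
  | nil =>
      intro bs k s ad bd _ _ _
      rw [PySem.List.pyRange_one_eq_nil (by simp)]
      simp [goldWW]
  | cons a as ih =>
      intro bs k s ad bd ha hb hlen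
      cases bs with
      | nil => simp at hlen
      | cons b bs =>
          have hka : PySem.List.pyGetD xa ((k : Int) + 1) 0 = a := by
            have hc : ((k : Int) + 1) = ((k + 1 : Nat) : Int) := by push_cast; ring
            rw [hc, PySem.List.pyGetD_natCast, getD_of_drop xa (k + 1) a as ha]
          have hkb : PySem.List.pyGetD xb ((k : Int) + 1) 0 = b := by
            have hc : ((k : Int) + 1) = ((k + 1 : Nat) : Int) := by push_cast; ring
            rw [hc, PySem.List.pyGetD_natCast, getD_of_drop xb (k + 1) b bs hb]
          have hcons : PySem.List.pyRange (k : Int) ((k : Int) + ((a :: as).length : Int)) 1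
              = (k : Int) :: PySem.List.pyRange ((k : Int) + 1) ((k : Int) + ((a :: as).length : Int)) 1 := by
            apply PySem.List.pyRange_one_cons
            push_cast [List.length_cons]; omega
          have hbnd : (k : Int) + ((a :: as).length : Int)
              = ((k + 1 : Nat) : Int) + (as.length : Int) := by
            push_cast [List.length_cons]; ring
          have hk1 : ((k : Int) + 1) = ((k + 1 : Nat) : Int) := by push_cast; ring
          have ha' : xa.drop (k + 1 + 1) = as := drop_succ_of_drop xa (k + 1) a as ha
          have hb' : xb.drop (k + 1 + 1) = bs := drop_succ_of_drop xb (k + 1) b bs hb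
          rw [hcons]
          simp only [List.foldl_cons, hka, hkb]
          rw [hk1, hbnd]
          have key := ih bs (k + 1) (if a = b ∧ ad + a = bd + b then s + a else s)
              (ad + a) (bd + b) ha' hb' (by simpa using hlen)
          have h2 : (if a = b ∧ ad + a = bd + b then s + a else s)
                + goldWW as bs (ad + a) (bd + b)
              = s + goldWW (a :: as) (b :: bs) ad bd := by
            simp only [goldWW]; split_ifs <;> ring
          exact key.trans h2

-- the countdown range B iterates over is the reverse of the forward range
lemma countdown_eq_reverse (m : Nat) :
    PySem.List.pyRange ((m : Int) - 1) (-1) (-1) = (PySem.List.pyRange 0 (m : Int) 1).reverse := by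
  rw [PySem.List.pyRange_neg_one, PySem.List.pyRange_one]
  have hm1 : ((m : Int) - 1 - -1).toNat = m := by omega
  have hm2 : (((m : Int)) - 0).toNat = m := by omega
  rw [hm1, hm2]
  apply List.ext_getElem
  · simp
  · intro i h1 h2
    simp only [List.getElem_map, List.getElem_reverse, List.length_map, List.length_range,
      List.getElem_range]
    have hi : i < m := by simpa using h1
    omega

-- B's backward loop, as a foldr over the forward range, computes gBWW
lemma loopB (xa xb : List Int) (t : Int) : ∀ (as bs : List Int) (k : Nat),
    xa.drop k = as → xb.drop k = bs → as.length ≤ bs.length →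
    (PySem.List.pyRange (k : Int) ((k : Int) + as.length) 1).foldr
      (fun i (st : Int × Int) =>
        let x := PySem.List.pyGetD xa i 0
        let y := PySem.List.pyGetD xb i 0
        ((if x = y ∧ st.2 = t then st.1 + x else st.1), st.2 + (x - y)))
      ((0 : Int), (0 : Int))
    = gBWW t as bs := by
  intro as
  induction as with
  | nil =>
      intro bs k _ _ _
      rw [PySem.List.pyRange_one_eq_nil (by simp)]
      simp [gBWW]
  | cons a as ih =>
      intro bs k ha hb hlen
      cases bs with
      | nil => simp at hlen
      | cons b bs =>
          have hka : PySem.List.pyGetD xa (k : Int) 0 = a := by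
            rw [PySem.List.pyGetD_natCast, getD_of_drop xa k a as ha]
          have hkb : PySem.List.pyGetD xb (k : Int) 0 = b := by
            rw [PySem.List.pyGetD_natCast, getD_of_drop xb k b bs hb]
          have hcons : PySem.List.pyRange (k : Int) ((k : Int) + ((a :: as).length : Int)) 1
              = (k : Int) :: PySem.List.pyRange ((k : Int) + 1) ((k : Int) + ((a :: as).length : Int)) 1 := by
            apply PySem.List.pyRange_one_cons
            push_cast [List.length_cons]; omega
          have hbnd : (k : Int) + ((a :: as).length : Int)
              = ((k + 1 : Nat) : Int) + (as.length : Int) := by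
            push_cast [List.length_cons]; ring
          have hk1 : ((k : Int) + 1) = ((k + 1 : Nat) : Int) := by push_cast; ring
          rw [hcons]
          simp only [List.foldr_cons]
          rw [hk1, hbnd,
            ih bs (k + 1) (drop_succ_of_drop xa k a as ha) (drop_succ_of_drop xb k b bs hb)
              (by simpa using hlen)]
          simp only [gBWW, hka, hkb]
          exact Prod.ext rfl (by ring)

-- the backward recursion computes the forward gold value and the zipped difference sum
lemma gBWW_eq (t : Int) : ∀ (as bs : List Int) (ad bd : Int), as.length ≤ bs.length →
    (ad - bd) + dsumWW as bs = t →
    gBWW t as bs = (goldWW as bs ad bd, dsumWW as bs) := by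
  intro as
  induction as with
  | nil => intro bs ad bd _ _; simp [gBWW, goldWW, dsumWW]
  | cons a as ih =>
      intro bs ad bd hlen ht
      cases bs with
      | nil => simp at hlen
      | cons b bs =>
          have ht' : ((ad + a) - (bd + b)) + dsumWW as bs = t := by
            simp only [dsumWW] at ht; linarith
          have key := ih bs (ad + a) (bd + b) (by simpa using hlen) ht'
          simp only [gBWW, goldWW, dsumWW, key]
          split_ifs with h1 h2 h3
          · exact Prod.ext (by ring) rfl
          · exact absurd ⟨h1.1, by linarith [ht', h1.2, h1.1]⟩ h2
          · exact absurd ⟨h3.1, by linarith [ht', h3.2, h3.1]⟩ h1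
          · exact Prod.ext (by ring) rfl

-- the zipped difference sum equals sum(alice) - sum(bob[:len(alice)])
lemma dsumWW_eq_sums : ∀ (as bs : List Int), as.length ≤ bs.length →
    dsumWW as bs = as.sum - (bs.take as.length).sum := by
  intro as
  induction as with
  | nil => intro bs _; simp [dsumWW]
  | cons a as ih =>
      intro bs hlen
      cases bs with
      | nil => simp at hlen
      | cons b bs =>
          simp only [dsumWW, List.length_cons, List.take_succ_cons, List.sum_cons,
            ih bs (by simpa using hlen)]
          ring

-- ===== VERDICT (by name: the statement is the Claim_ definition above) =====
theorem weirdwalk_spec : Claim_equal_weirdwalk := by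
  intro alice bob _ hpre
  unfold Spec_weirdwalk
  simp only [weirdwalk, weirdwalk_alt]
  have hA := loopA ((0 : Int) :: alice) ((0 : Int) :: bob) alice bob 0 0 0 0
      (by simp) (by simp) hpre
  simp only [Nat.cast_zero, zero_add] at hA
  have e1 : ((((0 : Int) :: alice).length : Int) - 1) = (alice.length : Int) := by simp
  have ht : (0 - 0 : Int) + dsumWW alice bob
      = alice.sum - (PySem.List.slice bob (some 0) (some (alice.length : Int))).sum := by
    rw [PySem.List.slice_zero_start, PySem.List.slice_to_natCast]
    rw [dsumWW_eq_sums alice bob hpre]; ring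
  have hB := loopB alice bob
      (alice.sum - (PySem.List.slice bob (some 0) (some (alice.length : Int))).sum)
      alice bob 0 (by simp) (by simp) hpre
  have hgB := gBWW_eq
      (alice.sum - (PySem.List.slice bob (some 0) (some (alice.length : Int))).sum)
      alice bob 0 0 hpre ht
  simp only [Nat.cast_zero, zero_add] at hB
  rw [e1, countdown_eq_reverse alice.length, List.foldl_reverse]
  rw [hA]
  have : (PySem.List.pyRange 0 (alice.length : Int) 1).foldr
      (fun i (st : Int × Int) =>
        let x := PySem.List.pyGetD alice i 0
        let y := PySem.List.pyGetD bob i 0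
        ((if x = y ∧ st.2 = (alice.sum - (PySem.List.slice bob (some 0) (some (alice.length : Int))).sum)
          then st.1 + x else st.1), st.2 + (x - y)))
      ((0 : Int), (0 : Int))
      = (goldWW alice bob 0 0, dsumWW alice bob) := hB.trans hgB
  simp only [this]
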